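-- pv_equiv track=rewrite | github.com/FatimaShibli/small-projects | cryptography.py | dec
-- ===== SOURCE A (Python) =====
-- def dec(SPC, LTR):
--     REF = list("ABCDEFGHIJKLMNOPQRSTUVWXYZabcdefghijklmnopqrstuvwxyz") #this should be a list of all possible words
--
--     for char in REF:
--         if (ord(char)^32 == int(SPC,16)^int(LTR,16)):
--             return char
--         elif (int(SPC,16)^int(LTR,16) == 0):
--             return " "
--
--     return "_" # this output= something went wrong
-- ===== SOURCE B (Python) =====
-- def dec(SPC, LTR):
--     t = int(SPC, 16) ^ int(LTR, 16)
--     if t == 0: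
--         return " "
--     code = t ^ 32
--     if 65 <= code <= 90 or 97 <= code <= 122:
--         return chr(code)
--     return "_"
-- ===== Notes on version B (the rewrite author's own statement) =====
-- stated objective: faster
-- what changed: Replaces the scan over the 52-letter reference list (which re-parses both hex strings at every iteration) with one parse of each string and a closed-form inversion: t = int(SPC,16)^int(LTR,16); ' ' if t==0, chr(t^32) if t^32 is a letter code, else '_'.
import Mathlib
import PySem

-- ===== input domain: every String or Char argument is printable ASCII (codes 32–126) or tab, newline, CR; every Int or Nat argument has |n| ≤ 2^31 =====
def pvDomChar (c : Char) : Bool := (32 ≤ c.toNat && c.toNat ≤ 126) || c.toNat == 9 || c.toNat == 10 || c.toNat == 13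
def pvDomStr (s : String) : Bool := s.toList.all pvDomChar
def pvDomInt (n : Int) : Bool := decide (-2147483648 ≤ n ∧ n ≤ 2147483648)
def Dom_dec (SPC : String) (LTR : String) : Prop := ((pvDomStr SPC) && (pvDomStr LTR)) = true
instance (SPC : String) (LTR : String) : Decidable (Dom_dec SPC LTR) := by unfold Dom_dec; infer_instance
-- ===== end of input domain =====

-- B replaces A's scan over the 52-letter reference list with a single parse of each hex string
-- and a closed-form inversion of ord(char)^32.

-- ===== PORT A =====
-- A's reference list REF = list("ABC…xyz")
def pyREF : List Char := "ABCDEFGHIJKLMNOPQRSTUVWXYZabcdefghijklmnopqrstuvwxyz".toList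

-- A's 'for char in REF' loop; t stands for int(SPC,16)^int(LTR,16), which A recomputes
-- at every step but which is constant throughout the loop
def loopA (t : Int) : List Char → String
  | [] => "_"
  | c :: rest =>
    if PySem.Int.bxor (c.toNat : Int) 32 = t then String.ofList [c]
    else if t = 0 then " "
    else loopA t rest

def dec (SPC : String) (LTR : String) : String :=
  match PySem.Int.ofStrBase? SPC 16, PySem.Int.ofStrBase? LTR 16 with
  | some a, some b => loopA (PySem.Int.bxor a b) pyREF
  | _, _ => ""   -- int(...,16) raises ValueError here: outside Pre_dec

-- ===== PORT B =====
def dec_alt (SPC : String) (LTR : String) : String :=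
  match PySem.Int.ofStrBase? SPC 16 with
  | none => ""   -- int(SPC,16) raises ValueError here: outside Pre_dec
  | some a =>
  match PySem.Int.ofStrBase? LTR 16 with
  | none => ""   -- int(LTR,16) raises ValueError here: outside Pre_dec
  | some b =>
    let t : Int := PySem.Int.bxor a b
    if t = 0 then " "
    else
      let code : Int := PySem.Int.bxor t 32
      if (65 ≤ code ∧ code ≤ 90) ∨ (97 ≤ code ∧ code ≤ 122) then String.ofList [Char.ofNat code.toNat]
      else "_"

-- ===== PRECONDITION & SPEC =====
-- Pre_ excludes exactly the inputs on which int(SPC,16) or int(LTR,16) raises ValueError.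
def Pre_dec (SPC : String) (LTR : String) : Prop :=
  (PySem.Int.ofStrBase? SPC 16).isSome ∧ (PySem.Int.ofStrBase? LTR 16).isSome
instance (SPC : String) (LTR : String) : Decidable (Pre_dec SPC LTR) := by unfold Pre_dec; infer_instance

def pvWitness_dec : String × String := ("20", "4f")

def Spec_dec (SPC : String) (LTR : String) (out : String) : Prop := out = dec_alt SPC LTR
instance (SPC : String) (LTR : String) (out : String) : Decidable (Spec_dec SPC LTR out) := by unfold Spec_dec; infer_instance

-- ===== CLAIM (what is proved, stated in full; the proofs are below) =====
def Claim_equal_dec : Prop := ∀ (SPC : String) (LTR : String), Dom_dec SPC LTR → Pre_dec SPC LTR → Spec_dec SPC LTR (dec SPC LTR)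

-- ===== LEMMAS AND PROOFS =====

-- xor with a fixed mask is an involution (Python-exact bxor, all sign cases)
lemma bxor_cancel (a b : Int) : PySem.Int.bxor (PySem.Int.bxor a b) b = a := by
  rcases le_or_gt 0 a with ha | ha <;> rcases le_or_gt 0 b with hb | hb <;>
    simp only [PySem.Int.bxor, ha, hb, if_pos, not_le.mpr, if_false]
  · simp [Int.toNat_of_nonneg ha]
  · split_ifs with h
    · omega
    · rw [show (-(-(↑(a.toNat ^^^ (-b - 1).toNat) : ℤ) - 1) - 1).toNat = a.toNat ^^^ (-b - 1).toNat from by omega,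
        Nat.xor_xor_cancel_right, Int.toNat_of_nonneg ha]
  · rw [show (-(-(↑((-a - 1).toNat ^^^ b.toNat) : ℤ) - 1) - 1).toNat = (-a - 1).toNat ^^^ b.toNat from by omega,
      Nat.xor_xor_cancel_right]
    omega
  · rw [show ((↑((-a - 1).toNat ^^^ (-b - 1).toNat) : ℤ)).toNat = (-a - 1).toNat ^^^ (-b - 1).toNat from by omega,
      Nat.xor_xor_cancel_right]
    omega

lemma bxor_eq_iff (a t : Int) : PySem.Int.bxor a 32 = t ↔ a = PySem.Int.bxor t 32 := by
  constructor <;> intro h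
  · rw [← h, bxor_cancel]
  · rw [h, bxor_cancel]

-- with t ≠ 0, A's loop is a first-match search for ord(c) = t ^ 32
def findA (code : Int) : List Char → String
  | [] => "_"
  | c :: rest => if (c.toNat : Int) = code then String.ofList [c] else findA code rest

lemma loopA_eq_find (t : Int) (ht : t ≠ 0) (l : List Char) :
    loopA t l = findA (PySem.Int.bxor t 32) l := by
  induction l with
  | nil => rfl
  | cons c rest ih =>
    simp only [loopA, findA, bxor_eq_iff, ht, if_false, ih]

lemma findA_REF (code : Int)
    (h : (65 ≤ code ∧ code ≤ 90) ∨ (97 ≤ code ∧ code ≤ 122)) :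
    findA code pyREF = String.ofList [Char.ofNat code.toNat] := by
  rcases h with ⟨h1, h2⟩ | ⟨h1, h2⟩ <;> interval_cases code <;> decide

lemma findA_miss (code : Int) (l : List Char)
    (h : ∀ c ∈ l, (c.toNat : Int) ≠ code) : findA code l = "_" := by
  induction l with
  | nil => rfl
  | cons c rest ih =>
    simp only [findA, h c (List.mem_cons_self), if_false]
    exact ih fun d hd => h d (List.mem_cons_of_mem _ hd)

lemma findA_REF_miss (code : Int)
    (h : ¬ ((65 ≤ code ∧ code ≤ 90) ∨ (97 ≤ code ∧ code ≤ 122))) :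
    findA code pyREF = "_" := by
  apply findA_miss
  intro c hc
  have hall : pyREF.all (fun c => decide ((65 ≤ c.toNat ∧ c.toNat ≤ 90) ∨ (97 ≤ c.toNat ∧ c.toNat ≤ 122))) = true := by decide
  have := List.all_eq_true.mp hall c hc
  simp only [decide_eq_true_eq] at this
  omega

lemma dec_core (t : Int) :
    loopA t pyREF =
      (if t = 0 then " "
       else if (65 ≤ PySem.Int.bxor t 32 ∧ PySem.Int.bxor t 32 ≤ 90) ∨
               (97 ≤ PySem.Int.bxor t 32 ∧ PySem.Int.bxor t 32 ≤ 122)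
            then String.ofList [Char.ofNat (PySem.Int.bxor t 32).toNat] else "_") := by
  by_cases ht : t = 0
  · subst ht; decide
  · rw [if_neg ht, loopA_eq_find t ht]
    by_cases h : (65 ≤ PySem.Int.bxor t 32 ∧ PySem.Int.bxor t 32 ≤ 90) ∨
        (97 ≤ PySem.Int.bxor t 32 ∧ PySem.Int.bxor t 32 ≤ 122)
    · rw [if_pos h, findA_REF _ h]
    · rw [if_neg h, findA_REF_miss _ h]

-- ===== VERDICT (by name: the statement is the Claim_ definition above) =====
theorem dec_spec : Claim_equal_dec := by
  intro SPC LTR _ hpre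
  obtain ⟨h1, h2⟩ := hpre
  unfold Spec_dec dec dec_alt
  obtain ⟨a, ha⟩ := Option.isSome_iff_exists.mp h1
  obtain ⟨b, hb⟩ := Option.isSome_iff_exists.mp h2
  rw [ha, hb]
  exact dec_core (PySem.Int.bxor a b)
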